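-- pv_equiv track=rewrite | github.com/olisheldon/AgentBasedSystems-AI | olisheldon_bot.py | least_paintings_path
-- ===== SOURCE A (Python) =====
-- def least_paintings_path(target_score, current_round, bots, game_type, winner_pays, artists_and_values, round_limit,starting_budget, painting_order, target_collection, my_bot_details, current_painting, winner_ids, amounts_paid):
-- 	tot_value = my_bot_details['score']
-- 	upcoming_paintings = painting_order[current_round:]
-- 	ordered_paintings = []
-- 	round_buy_markers = []
-- 	for painting in ['Picasso','Van Gogh','Rembrandt','Da Vinci']: #paintings ordered by value
-- 		for i in range(len(upcoming_paintings)):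
-- 			if target_score < 0:
-- 				break
-- 			elif upcoming_paintings[i] == painting:
-- 				round_buy_markers.append(i+current_round)
-- 				target_score -= artists_and_values[painting]
-- 	return sorted(round_buy_markers)
-- ===== SOURCE B (Python) =====
-- def least_paintings_path(target_score, current_round, bots, game_type, winner_pays, artists_and_values, round_limit, starting_budget, painting_order, target_collection, my_bot_details, current_painting, winner_ids, amounts_paid):
--     # One grouping pass: global buy-index lists per artist, in increasing order.
--     index_by_artist = {artist: [] for artist in ('Picasso', 'Van Gogh', 'Rembrandt', 'Da Vinci')}
--     for i, painting in enumerate(painting_order[current_round:]):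
--         if painting in index_by_artist:
--             index_by_artist[painting].append(i + current_round)
--     # Consume the index lists in value-priority order until the target goes negative.
--     collected = []
--     for artist in ('Picasso', 'Van Gogh', 'Rembrandt', 'Da Vinci'):
--         if target_score < 0:
--             break
--         indices = index_by_artist[artist]
--         if not indices:
--             continue
--         value = artists_and_values[artist]
--         for idx in indices:
--             if target_score < 0:
--                 break
--             collected.append(idx)
--             target_score -= value
--     return sorted(collected)
-- ===== Notes on version B (the rewrite author's own statement) =====
-- stated objective: alternative
-- what changed: A rescans the whole upcoming-paintings slice once per artist (four passes with repeated equality tests); B does one grouping pass building a dict of per-artist global index lists and then a consume pass over that table in value-priority order.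
import Mathlib
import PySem

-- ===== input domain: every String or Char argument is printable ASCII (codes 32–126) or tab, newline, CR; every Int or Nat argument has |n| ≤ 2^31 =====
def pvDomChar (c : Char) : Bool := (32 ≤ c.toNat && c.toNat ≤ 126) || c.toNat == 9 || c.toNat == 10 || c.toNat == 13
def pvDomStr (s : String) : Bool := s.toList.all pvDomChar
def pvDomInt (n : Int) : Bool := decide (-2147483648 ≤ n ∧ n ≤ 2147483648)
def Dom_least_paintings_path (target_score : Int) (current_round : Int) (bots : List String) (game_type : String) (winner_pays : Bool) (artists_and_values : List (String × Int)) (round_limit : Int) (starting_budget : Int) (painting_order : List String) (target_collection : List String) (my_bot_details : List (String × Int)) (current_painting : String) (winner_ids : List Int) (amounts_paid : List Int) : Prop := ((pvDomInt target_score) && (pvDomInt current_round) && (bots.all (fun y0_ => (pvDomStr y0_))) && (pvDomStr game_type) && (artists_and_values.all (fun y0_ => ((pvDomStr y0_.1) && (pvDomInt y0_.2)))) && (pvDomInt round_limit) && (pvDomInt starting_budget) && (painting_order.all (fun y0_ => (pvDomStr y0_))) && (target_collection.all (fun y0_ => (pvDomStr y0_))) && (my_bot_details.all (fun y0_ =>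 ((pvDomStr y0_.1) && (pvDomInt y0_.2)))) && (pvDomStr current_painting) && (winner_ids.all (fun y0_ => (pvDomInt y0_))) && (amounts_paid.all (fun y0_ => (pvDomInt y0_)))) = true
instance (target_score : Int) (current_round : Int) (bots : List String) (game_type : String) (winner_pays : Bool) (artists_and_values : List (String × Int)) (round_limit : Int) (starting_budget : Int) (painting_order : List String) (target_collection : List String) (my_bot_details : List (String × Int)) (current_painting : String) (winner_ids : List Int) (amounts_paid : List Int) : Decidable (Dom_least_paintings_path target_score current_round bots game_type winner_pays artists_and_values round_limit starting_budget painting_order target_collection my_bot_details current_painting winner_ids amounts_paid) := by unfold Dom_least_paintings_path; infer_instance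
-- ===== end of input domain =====

-- B replaces A's four full scans of the upcoming paintings by one grouping pass that builds
-- per-artist index lists and a consume pass over that table (objective: alternative).

-- The four artist names, ordered by value (the literal list both Pythons iterate).
def lppArtists : List String := ["Picasso", "Van Gogh", "Rembrandt", "Da Vinci"]

-- Python dict lookup d[k] on the association list (first match); the default 0 is never
-- reached on inputs satisfying Pre_ (where Python would raise KeyError, outside Pre_).
def lppGet (d : List (String × Int)) (k : String) : Int :=
  ((d.find? (fun p => p.1 == k)).map Prod.snd).getD 0

-- ===== PORT A =====
-- inner loop of A: 'for i in range(len(upcoming_paintings)): if target_score < 0: break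
--  elif upcoming_paintings[i] == painting: append(i+current_round); target_score -= aav[painting]'
-- (the sequential indexing upcoming[i], i = 0,1,… is recursion on the list with an index counter)
def lppInnerA (painting : String) (aav : List (String × Int)) (cr : Int) :
    List String → Int → Int → List Int → Int × List Int
  | [], _, ts, ms => (ts, ms)
  | p :: rest, i, ts, ms =>
    if ts < 0 then (ts, ms)
    else if p == painting then
      lppInnerA painting aav cr rest (i + 1) (ts - lppGet aav painting) (ms ++ [i + cr])
    else lppInnerA painting aav cr rest (i + 1) ts ms

-- outer loop of A over the four artists, threading target_score and round_buy_markers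
def lppOuterA (aav : List (String × Int)) (up : List String) (cr : Int) :
    List String → Int → List Int → List Int
  | [], _, ms => ms
  | painting :: rest, ts, ms =>
    let r := lppInnerA painting aav cr up 0 ts ms
    lppOuterA aav up cr rest r.1 r.2

def least_paintings_path (target_score : Int) (current_round : Int) (bots : List String) (game_type : String) (winner_pays : Bool) (artists_and_values : List (String × Int)) (round_limit : Int) (starting_budget : Int) (painting_order : List String) (target_collection : List String) (my_bot_details : List (String × Int)) (current_painting : String) (winner_ids : List Int) (amounts_paid : List Int) : List Int :=
  -- tot_value = my_bot_details['score'] : looked up and never used; Pre_ requires the key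
  -- upcoming_paintings = painting_order[current_round:] (inlined below)
  PySem.List.sorted (lppOuterA artists_and_values (PySem.List.slice painting_order (some current_round) none) current_round lppArtists target_score []) (fun x => x) false

-- ===== PORT B =====
-- grouping pass: 'for i, painting in enumerate(painting_order[current_round:]):
--   if painting in index_by_artist: index_by_artist[painting].append(i + current_round)'
def lppBuild (cr : Int) (pairs : List (Int × String)) (d : PySem.Dict String (List Int)) :
    PySem.Dict String (List Int) :=
  pairs.foldl (fun d ip =>
    if d.contains ip.2 then d.modify ip.2 [] (fun l => l ++ [ip.1 + cr]) else d) d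

-- inner consume loop of B over one artist's index list
def lppConsume (v : Int) : List Int → Int → List Int → Int × List Int
  | [], ts, coll => (ts, coll)
  | idx :: rest, ts, coll =>
    if ts < 0 then (ts, coll)
    else lppConsume v rest (ts - v) (coll ++ [idx])

-- outer consume loop of B (break on negative target, skip empty index lists)
def lppOuterB (aav : List (String × Int)) (d : PySem.Dict String (List Int)) :
    List String → Int → List Int → List Int
  | [], _, coll => coll
  | artist :: rest, ts, coll =>
    if ts < 0 then coll
    else
      let indices := d.getD artist []
      if indices = [] then lppOuterB aav d rest ts coll
      else
        let v := lppGet aav artist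
        let r := lppConsume v indices ts coll
        lppOuterB aav d rest r.1 r.2

def least_paintings_path_alt (target_score : Int) (current_round : Int) (bots : List String) (game_type : String) (winner_pays : Bool) (artists_and_values : List (String × Int)) (round_limit : Int) (starting_budget : Int) (painting_order : List String) (target_collection : List String) (my_bot_details : List (String × Int)) (current_painting : String) (winner_ids : List Int) (amounts_paid : List Int) : List Int :=
  -- index_by_artist = {a: [] for a in (...)} then the grouping pass, then the consume pass (locals inlined)
  PySem.List.sorted
    (lppOuterB artists_and_values
      (lppBuild current_round
        (PySem.List.enumerate (PySem.List.slice painting_order (some current_round) none) 0)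
        (lppArtists.foldl (fun d a => d.insert a []) PySem.Dict.empty))
      lppArtists target_score [])
    (fun x => x) false

-- ===== PRECONDITION & SPEC =====
-- Pre_ excludes inputs where 'score' is missing from my_bot_details, or where one of the four
-- artists occurs in painting_order[current_round:] but is missing from artists_and_values: there
-- A raises KeyError, except in the rare case where the target goes negative before the missing
-- artist's first occurrence is reached (then A still returns, and B returns the same list).
def Pre_least_paintings_path (target_score : Int) (current_round : Int) (bots : List String) (game_type : String) (winner_pays : Bool) (artists_and_values : List (String × Int)) (round_limit : Int) (starting_budget : Int) (painting_order : List String) (target_collection : List String) (my_bot_details : List (String × Int)) (current_painting : String) (winner_ids : List Int) (amounts_paid : List Int) : Prop :=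
  (my_bot_details.find? (fun p => p.1 == "score")).isSome ∧
  ∀ a ∈ lppArtists, a ∈ PySem.List.slice painting_order (some current_round) none →
    (artists_and_values.find? (fun p => p.1 == a)).isSome
instance (target_score : Int) (current_round : Int) (bots : List String) (game_type : String) (winner_pays : Bool) (artists_and_values : List (String × Int)) (round_limit : Int) (starting_budget : Int) (painting_order : List String) (target_collection : List String) (my_bot_details : List (String × Int)) (current_painting : String) (winner_ids : List Int) (amounts_paid : List Int) : Decidable (Pre_least_paintings_path target_score current_round bots game_type winner_pays artists_and_values round_limit starting_budget painting_order target_collection my_bot_details current_painting winner_ids amounts_paid) := by unfold Pre_least_paintings_path; infer_instance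

def pvWitness_least_paintings_path : Int × Int × List String × String × Bool × (List (String × Int)) × Int × Int × List String × List String × (List (String × Int)) × String × List Int × List Int :=
  (10, 0, [], "", false, [("Picasso", 3), ("Van Gogh", 2), ("Rembrandt", 2), ("Da Vinci", 1)], 0, 0, ["Picasso", "Van Gogh"], [], [("score", 0)], "", [], [])

def Spec_least_paintings_path (target_score : Int) (current_round : Int) (bots : List String) (game_type : String) (winner_pays : Bool) (artists_and_values : List (String × Int)) (round_limit : Int) (starting_budget : Int) (painting_order : List String) (target_collection : List String) (my_bot_details : List (String × Int)) (current_painting : String) (winner_ids : List Int) (amounts_paid : List Int) (out : List Int) : Prop := out = least_paintings_path_alt target_score current_round bots game_type winner_pays artists_and_values round_limit starting_budget painting_order target_collection my_bot_details current_painting winner_ids amounts_paid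
instance (target_score : Int) (current_round : Int) (bots : List String) (game_type : String) (winner_pays : Bool) (artists_and_values : List (String × Int)) (round_limit : Int) (starting_budget : Int) (painting_order : List String) (target_collection : List String) (my_bot_details : List (String × Int)) (current_painting : String) (winner_ids : List Int) (amounts_paid : List Int) (out : List Int) : Decidable (Spec_least_paintings_path target_score current_round bots game_type winner_pays artists_and_values round_limit starting_budget painting_order target_collection my_bot_details current_painting winner_ids amounts_paid out) := by unfold Spec_least_paintings_path; infer_instance

-- ===== CLAIM (what is proved, stated in full; the proofs are below) =====
def Claim_equal_least_paintings_path : Prop := ∀ (target_score : Int) (current_round : Int) (bots : List String) (game_type : String) (winner_pays : Bool) (artists_and_values : List (String × Int)) (round_limit : Int) (starting_budget : Int) (painting_order : List String) (target_collection : List String) (my_bot_details : List (String × Int)) (current_painting : String) (winner_ids : List Int) (amounts_paid : List Int), Dom_least_paintings_path target_score current_round bots game_type winner_pays artists_and_values round_limit starting_budget painting_order target_collection my_bot_details current_painting winner_ids amounts_paid → Pre_least_paintings_path target_score current_round bots game_type winner_pays artists_and_values round_limit starting_budget painting_order target_collection my_bot_details current_painting winner_ids amounts_paid → Spec_least_paintings_path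 target_score current_round bots game_type winner_pays artists_and_values round_limit starting_budget painting_order target_collection my_bot_details current_painting winner_ids amounts_paid (least_paintings_path target_score current_round bots game_type winner_pays artists_and_values round_limit starting_budget painting_order target_collection my_bot_details current_painting winner_ids amounts_paid)

-- ===== LEMMAS AND PROOFS =====

-- the global indices (base b, b+1, …) at which `painting` occurs in a list
def lppMatchIdx (painting : String) : List String → Int → List Int
  | [], _ => []
  | p :: rest, b => if p == painting then b :: lppMatchIdx painting rest (b + 1) else lppMatchIdx painting rest (b + 1)

lemma lppConsume_neg (v : Int) (l : List Int) (ts : Int) (coll : List Int) (h : ts < 0) :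
    lppConsume v l ts coll = (ts, coll) := by
  cases l <;> simp [lppConsume, h]

lemma lppInnerA_eq_consume (painting : String) (aav : List (String × Int)) (cr : Int) :
    ∀ (up : List String) (i ts : Int) (ms : List Int),
      lppInnerA painting aav cr up i ts ms
        = lppConsume (lppGet aav painting) (lppMatchIdx painting up (i + cr)) ts ms := by
  intro up
  induction up with
  | nil => intro i ts ms; simp [lppInnerA, lppMatchIdx, lppConsume]
  | cons p rest ih =>
    intro i ts ms
    by_cases h : ts < 0
    · rw [lppInnerA, if_pos h, lppConsume_neg _ _ _ _ h]
    · by_cases hp : p == painting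
      · rw [lppInnerA, if_neg h, if_pos hp, ih, show i + 1 + cr = i + cr + 1 by ring]
        have hm : lppMatchIdx painting (p :: rest) (i + cr)
            = (i + cr) :: lppMatchIdx painting rest (i + cr + 1) := by
          simp [lppMatchIdx, hp]
        rw [hm, lppConsume, if_neg h]
      · rw [lppInnerA, if_neg h, if_neg hp, ih, show i + 1 + cr = i + cr + 1 by ring]
        have hm : lppMatchIdx painting (p :: rest) (i + cr)
            = lppMatchIdx painting rest (i + cr + 1) := by
          simp [lppMatchIdx, hp]
        rw [hm]

lemma lppOuterA_neg (aav : List (String × Int)) (up : List String) (cr : Int) :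
    ∀ (arts : List String) (ts : Int) (ms : List Int), ts < 0 →
      lppOuterA aav up cr arts ts ms = ms := by
  intro arts
  induction arts with
  | nil => intro ts ms _; rfl
  | cons a rest ih =>
    intro ts ms h
    rw [lppOuterA, lppInnerA_eq_consume, lppConsume_neg _ _ _ _ h]
    exact ih ts ms h

-- the grouping pass appends exactly the match indices of each stored artist
lemma lppBuild_getD (cr : Int) (a : String) :
    ∀ (up : List String) (i : Int) (d : PySem.Dict String (List Int)),
      d.contains a = true →
      (lppBuild cr (PySem.List.enumerate up i) d).getD a []
        = d.getD a [] ++ lppMatchIdx a up (i + cr) := by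
  intro up
  induction up with
  | nil => intro i d _; simp [PySem.List.enumerate_nil, lppBuild, lppMatchIdx]
  | cons p rest ih =>
    intro i d hd
    rw [PySem.List.enumerate_cons, lppBuild, List.foldl_cons]
    rw [show (List.foldl _ _ _ : PySem.Dict String (List Int)) = lppBuild cr (PySem.List.enumerate rest (i + 1)) (if d.contains p then d.modify p [] (fun l => l ++ [i + cr]) else d) from rfl]
    by_cases hp : p == a
    · have hpa : p = a := by simpa using hp
      subst hpa
      rw [if_pos hd, lppMatchIdx, if_pos hp]
      rw [ih (i + 1) _ (by simp [PySem.Dict.contains_modify, hd])]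
      rw [PySem.Dict.getD_modify_self]
      simp [show i + 1 + cr = i + cr + 1 by ring]
    · have hpa : p ≠ a := by simpa using hp
      rw [lppMatchIdx, if_neg hp]
      by_cases h : d.contains p
      · rw [if_pos h, ih (i + 1) _ (by simp [PySem.Dict.contains_modify, hd])]
        rw [PySem.Dict.getD_modify_of_ne _ _ _ (Ne.symm hpa)]
        simp [show i + 1 + cr = i + cr + 1 by ring]
      · rw [if_neg h, ih (i + 1) _ hd]
        simp [show i + 1 + cr = i + cr + 1 by ring]

-- with the table in hand, the two outer loops thread identical states
lemma lppOuter_eq (aav : List (String × Int)) (up : List String) (cr : Int)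
    (d : PySem.Dict String (List Int)) :
    ∀ (arts : List String), (∀ a ∈ arts, d.getD a [] = lppMatchIdx a up cr) →
    ∀ (ts : Int) (ms : List Int),
      lppOuterA aav up cr arts ts ms = lppOuterB aav d arts ts ms := by
  intro arts
  induction arts with
  | nil => intro _ ts ms; rfl
  | cons a rest ih =>
    intro hyp ts ms
    have ha : d.getD a [] = lppMatchIdx a up cr := hyp a (by simp)
    have hrest : ∀ b ∈ rest, d.getD b [] = lppMatchIdx b up cr :=
      fun b hb => hyp b (by simp [hb])
    rw [lppOuterA, lppOuterB, lppInnerA_eq_consume]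
    by_cases h : ts < 0
    · rw [if_pos h, lppConsume_neg _ _ _ _ h]
      exact lppOuterA_neg aav up cr rest ts ms h
    · rw [if_neg h]
      by_cases he : d.getD a [] = []
      · rw [if_pos he]
        rw [show (0 : Int) + cr = cr by ring, ← ha, he, lppConsume]
        exact ih hrest ts ms
      · rw [if_neg he, show (0 : Int) + cr = cr by ring, ← ha]
        exact ih hrest _ _

-- the initial four-key table: keys and stored (empty) lists
lemma lppD0_contains (a : String) :
    (lppArtists.foldl (fun d b => d.insert b ([] : List Int)) PySem.Dict.empty).contains a
      = decide (a ∈ lppArtists) := by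
  simp [lppArtists, List.foldl_cons, PySem.Dict.contains_insert, PySem.Dict.contains_empty]
  by_cases h1 : a = "Picasso" <;> by_cases h2 : a = "Van Gogh" <;>
    by_cases h3 : a = "Rembrandt" <;> by_cases h4 : a = "Da Vinci" <;>
    simp [h1, h2, h3, h4]

lemma lppD0_getD (a : String) (h : a ∈ lppArtists) :
    (lppArtists.foldl (fun d b => d.insert b ([] : List Int)) PySem.Dict.empty).getD a ([] : List Int) = [] := by
  fin_cases h <;> decide

-- ===== VERDICT (by name: the statement is the Claim_ definition above) =====
theorem least_paintings_path_spec : Claim_equal_least_paintings_path := by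
  intro ts cr bots gt wp aav rl sb po tc mbd cp wids ap _ _
  unfold Spec_least_paintings_path least_paintings_path least_paintings_path_alt
  congr 1
  apply lppOuter_eq
  intro a ha
  rw [lppBuild_getD cr a _ 0 _ (by rw [lppD0_contains]; simpa using ha)]
  rw [lppD0_getD a ha]
  simp [show (0 : Int) + cr = cr by ring]
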